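-- pv_equiv track=rewrite | github.com/953250587/leetcode-python | NextGreaterElementIII_MID_556.py | nextGreaterElement_1
-- ===== SOURCE A (Python) =====
-- def nextGreaterElement_1(n):
--     """
--     :type n: int
--     :rtype: int
--     29ms
--     """
--     index1 = -1
--     n = list(str(n))
--     for i in range(len(n) - 1, 0, -1):
--         if n[i - 1] < n[i]:
--             index1 = i - 1
--             break
--
--     if index1 == -1:
--         return -1
--
--
--     index2 = index1 + 1
--     temp = n[index1]
--     larger = n[index1 + 1]
--     for i in range(index1 + 1, len(n)):
--         if n[i] > temp and n[i] < larger: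
--             larger = n[i]
--             index2 = i
--
--     # swap the two digits
--     n[index1], n[index2] = n[index2], n[index1]
--     n[index1 + 1:] = sorted(n[index1 + 1:])
--     if int("".join(n)) < 2 ** 31 - 1:
--         return int("".join(n))
--     else:
--         return -1
-- ===== SOURCE B (Python) =====
-- def _choose(left, right, acc, digits, best):
--     # try each element of `right` as the next digit of the arrangement
--     if not right:
--         return best
--     best = _search(left + right[1:], acc + [right[0]], digits, best)
--     return _choose(left + [right[0]], right[1:], acc, digits, best)
--
--
-- def _search(remaining, acc, digits, best):
--     # exhaustively extend `acc` by all arrangements of `remaining`; keep the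
--     # lexicographically smallest full arrangement strictly greater than `digits`
--     # (equal lengths, so list comparison == numeric comparison of the digit strings)
--     if not remaining:
--         if acc > digits and (best is None or acc < best):
--             return acc
--         return best
--     return _choose([], remaining, acc, digits, best)
--
--
-- def nextGreaterElement_1(n):
--     digits = list(str(abs(n)))
--     best = _search(digits, [], digits, None)
--     if best is None:
--         return -1
--     r = int(("-" if n < 0 else "") + "".join(best))
--     return r if r < 2 ** 31 - 1 else -1
-- ===== Notes on version B (the rewrite author's own statement) =====
-- stated objective: alternative
-- what changed: A constructs the answer directly by the pivot-scan/swap/sort next-permutation procedure; B does an exhaustive recursive search over all arrangements of the digits, keeping the lexicographically smallest full arrangement strictly greater than the original digit string, and converts only that winner to an int — enumeration plus min-filter instead of constructive rearrangement (exact but factorial-time, so much slower on many-digit inputs).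
import Mathlib
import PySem

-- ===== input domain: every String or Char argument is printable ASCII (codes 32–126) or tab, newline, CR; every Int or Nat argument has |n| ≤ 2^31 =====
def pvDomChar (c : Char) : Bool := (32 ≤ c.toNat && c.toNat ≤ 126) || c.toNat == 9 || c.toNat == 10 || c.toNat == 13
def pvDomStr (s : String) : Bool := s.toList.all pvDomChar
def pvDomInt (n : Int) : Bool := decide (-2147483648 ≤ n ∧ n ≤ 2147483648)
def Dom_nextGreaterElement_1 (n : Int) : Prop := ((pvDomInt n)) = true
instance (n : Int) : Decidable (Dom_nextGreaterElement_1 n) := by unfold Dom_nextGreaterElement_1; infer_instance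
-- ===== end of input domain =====

-- B replaces A's pivot-scan/swap/sort construction by an exhaustive recursive search over all
-- arrangements of the digits, keeping the lexicographically smallest one strictly greater than
-- the original digit string (factorial-time, so slower; objective: alternative).

-- ===== PORT A =====
-- 'for i in range(len(n)-1, 0, -1): if n[i-1] < n[i]: index1 = i-1; break' (post-loop default -1)
def pvALoop1 (s : List Char) : List Int → Int
  | [] => -1
  | i :: rest =>
      if PySem.List.pyGetD s (i - 1) ' ' < PySem.List.pyGetD s i ' ' then i - 1
      else pvALoop1 s rest

-- 'for i in range(index1+1, len(n)): if n[i] > temp and n[i] < larger: larger = n[i]; index2 = i'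
def pvALoop2 (s : List Char) (temp : Char) : List Int → Char × Int → Char × Int
  | [], st => st
  | i :: rest, (larger, idx2) =>
      if temp < PySem.List.pyGetD s i ' ' ∧ PySem.List.pyGetD s i ' ' < larger then
        pvALoop2 s temp rest (PySem.List.pyGetD s i ' ', i)
      else pvALoop2 s temp rest (larger, idx2)

def nextGreaterElement_1 (n : Int) : Int :=
  let s := PySem.Int.toChars n
  let index1 := pvALoop1 s (PySem.List.pyRange ((s.length : Int) - 1) 0 (-1))
  if index1 = -1 then -1
  else
    let temp := PySem.List.pyGetD s index1 ' '
    let r := pvALoop2 s temp (PySem.List.pyRange (index1 + 1) (s.length : Int) 1)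
               (PySem.List.pyGetD s (index1 + 1) ' ', index1 + 1)
    -- n[index1], n[index2] = n[index2], n[index1]
    let s1 := PySem.List.pySetD (PySem.List.pySetD s index1 (PySem.List.pyGetD s r.2 ' ')) r.2
                (PySem.List.pyGetD s index1 ' ')
    -- n[index1+1:] = sorted(n[index1+1:])
    let s2 := PySem.List.slice s1 none (some (index1 + 1)) ++
              PySem.List.sorted (PySem.List.slice s1 (some (index1 + 1)) none) (fun c => c) false
    match PySem.Int.ofChars? s2 with
    | some m => if m < 2 ^ 31 - 1 then m else -1
    | none => -1   -- int("".join(n)) raises ValueError here; excluded by Pre_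

-- ===== PORT B =====
-- Python's '<' on two lists of (one-char) strings: exact lexicographic comparison, hand-ported
def pvLexLt : List Char → List Char → Bool
  | [], [] => false
  | [], _ :: _ => true
  | _ :: _, [] => false
  | a :: as, b :: bs => if a < b then true else if b < a then false else pvLexLt as bs

mutual
-- '_search(remaining, acc, digits, best)'
def pvSearch (remaining acc digits : List Char) (best : Option (List Char)) :
    Option (List Char) :=
  match remaining with
  | [] =>
      -- 'if acc > digits and (best is None or acc < best): return acc / return best'
      match best with
      | none => if pvLexLt digits acc then some acc else none
      | some b => if pvLexLt digits acc ∧ pvLexLt acc b then some acc else some b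
  | c :: rest => pvChoose [] (c :: rest) acc digits best
termination_by (remaining.length, remaining.length + 1)
decreasing_by
  all_goals simp [Prod.lex_iff]; try omega

-- '_choose(left, right, acc, digits, best)'
def pvChoose (left right acc digits : List Char) (best : Option (List Char)) :
    Option (List Char) :=
  match right with
  | [] => best
  | c :: rest =>
      pvChoose (left ++ [c]) rest acc digits
        (pvSearch (left ++ rest) (acc ++ [c]) digits best)
termination_by (left.length + right.length, right.length)
decreasing_by
  all_goals simp [Prod.lex_iff]; try omega
end

def nextGreaterElement_1_alt (n : Int) : Int :=
  let digits := PySem.Int.toChars (if 0 ≤ n then n else -n)   -- list(str(abs(n)))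
  match pvSearch digits [] digits none with
  | none => -1
  | some best =>
      -- r = int(("-" if n < 0 else "") + "".join(best))
      match PySem.Int.ofChars? ((if n < 0 then ['-'] else []) ++ best) with
      | some r => if r < 2 ^ 31 - 1 then r else -1
      | none => -1   -- unreachable: best is a nonempty digit string, int() cannot fail there

-- ===== PRECONDITION & SPEC =====
-- Pre_ excludes exactly the inputs where A raises ValueError: negative n whose digit string after
-- the sign is non-increasing, so the '-' sign is swapped into the interior and int() fails.
def Pre_nextGreaterElement_1 (n : Int) : Prop :=
  0 ≤ n ∨ ¬ List.IsChain (fun a b => b ≤ a) ((PySem.Int.toChars n).drop 1)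
instance (n : Int) : Decidable (Pre_nextGreaterElement_1 n) := by
  unfold Pre_nextGreaterElement_1; infer_instance

def pvWitness_nextGreaterElement_1 : Int := 12

def Spec_nextGreaterElement_1 (n : Int) (out : Int) : Prop := out = nextGreaterElement_1_alt n
instance (n : Int) (out : Int) : Decidable (Spec_nextGreaterElement_1 n out) := by
  unfold Spec_nextGreaterElement_1; infer_instance

-- ===== CLAIM (what is proved, stated in full; the proofs are below) =====
def Claim_equal_nextGreaterElement_1 : Prop :=
  ∀ (n : Int), Dom_nextGreaterElement_1 n → Pre_nextGreaterElement_1 n →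
    Spec_nextGreaterElement_1 n (nextGreaterElement_1 n)

-- ===== LEMMAS AND PROOFS =====

-- ---- basic order facts about the lexicographic comparison ----
lemma pvLex_cons_self (x : Char) (a b : List Char) :
    pvLexLt (x :: a) (x :: b) = pvLexLt a b := by
  simp [pvLexLt]

lemma pvLex_cons_lt {x y : Char} (h : x < y) (a b : List Char) :
    pvLexLt (x :: a) (y :: b) = true := by
  simp [pvLexLt, h]

lemma pvLex_asymm : ∀ a b : List Char, pvLexLt a b = true → pvLexLt b a = false := by
  intro a
  induction a with
  | nil =>
      intro b h
      cases b with
      | nil => simp [pvLexLt] at h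
      | cons y u => rfl
  | cons x t ih =>
      intro b h
      cases b with
      | nil => exact absurd h (by simp [pvLexLt])
      | cons y u =>
          simp only [pvLexLt] at h ⊢
          rcases lt_trichotomy x y with h1 | h1 | h1
          · rw [if_neg (not_lt.mpr (le_of_lt h1)), if_pos h1]
          · subst h1
            simp only [lt_irrefl, if_false] at h ⊢
            exact ih u h
          · rw [if_neg (not_lt.mpr (le_of_lt h1)), if_pos h1] at h
            exact absurd h (by simp)

lemma pvLex_trans : ∀ a b c : List Char,
    pvLexLt a b = true → pvLexLt b c = true → pvLexLt a c = true := by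
  intro a
  induction a with
  | nil =>
      intro b c hab hbc
      cases b with
      | nil => simp [pvLexLt] at hab
      | cons y u =>
          cases c with
          | nil => simp [pvLexLt] at hbc
          | cons z v => rfl
  | cons x t ih =>
      intro b c hab hbc
      cases b with
      | nil => exact absurd hab (by simp [pvLexLt])
      | cons y u =>
          cases c with
          | nil => exact absurd hbc (by simp [pvLexLt])
          | cons z v =>
              simp only [pvLexLt] at hab hbc ⊢
              rcases lt_trichotomy x y with h1 | h1 | h1
              · rcases lt_trichotomy y z with h2 | h2 | h2
                · rw [if_pos (lt_trans h1 h2)]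
                · subst h2; rw [if_pos h1]
                · rw [if_neg (not_lt.mpr (le_of_lt h2)), if_pos h2] at hbc
                  exact absurd hbc (by simp)
              · subst h1
                simp only [lt_irrefl, if_false] at hab
                rcases lt_trichotomy x z with h2 | h2 | h2
                · rw [if_pos h2]
                · subst h2
                  simp only [lt_irrefl, if_false]
                  simp only [lt_irrefl, if_false] at hbc
                  exact ih u v hab hbc
                · rw [if_neg (not_lt.mpr (le_of_lt h2)), if_pos h2] at hbc
                  exact absurd hbc (by simp)
              · rw [if_neg (not_lt.mpr (le_of_lt h1)), if_pos h1] at hab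
                exact absurd hab (by simp)

lemma pvLex_trichotomy : ∀ a b : List Char,
    pvLexLt a b = true ∨ a = b ∨ pvLexLt b a = true := by
  intro a
  induction a with
  | nil =>
      intro b
      cases b with
      | nil => exact Or.inr (Or.inl rfl)
      | cons y u => exact Or.inl rfl
  | cons x t ih =>
      intro b
      cases b with
      | nil => exact Or.inr (Or.inr rfl)
      | cons y u =>
          rcases lt_trichotomy x y with h1 | h1 | h1
          · exact Or.inl (pvLex_cons_lt h1 t u)
          · subst h1
            rcases ih u with h2 | h2 | h2
            · exact Or.inl (by rwa [pvLex_cons_self])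
            · exact Or.inr (Or.inl (by rw [h2]))
            · exact Or.inr (Or.inr (by rwa [pvLex_cons_self]))
          · exact Or.inr (Or.inr (pvLex_cons_lt h1 u t))

lemma pvLex_append_left : ∀ (u a b : List Char),
    pvLexLt (u ++ a) (u ++ b) = pvLexLt a b := by
  intro u a b
  induction u with
  | nil => rfl
  | cons x t ih => simpa [pvLex_cons_self] using ih

-- non-increasing lists are lexicographically maximal among their rearrangements
lemma pvLex_max : ∀ (w q : List Char), w.Pairwise (fun a b => b ≤ a) → q.Perm w →
    pvLexLt w q = false := by
  intro w
  induction w with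
  | nil =>
      intro q _ hq
      rw [hq.eq_nil]
      rfl
  | cons a w' ih =>
      intro q hw hq
      cases q with
      | nil => exact absurd hq.symm.eq_nil (by simp)
      | cons b q' =>
          have hmem : b ∈ a :: w' := hq.subset (List.mem_cons_self ..)
          have hba : b ≤ a := by
            rcases List.mem_cons.mp hmem with h | h
            · exact le_of_eq h
            · exact (List.pairwise_cons.mp hw).1 b h
          rcases lt_or_eq_of_le hba with h1 | h1
          · simp only [pvLexLt]
            rw [if_neg (not_lt.mpr (le_of_lt h1)), if_pos h1]
          · subst h1
            rw [pvLex_cons_self]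
            exact ih q' (List.pairwise_cons.mp hw).2 hq.cons_inv

-- non-decreasing lists are lexicographically minimal among their rearrangements
lemma pvLex_min : ∀ (w q : List Char), w.Pairwise (fun a b => a ≤ b) → q.Perm w →
    pvLexLt q w = false := by
  intro w
  induction w with
  | nil =>
      intro q _ hq
      rw [hq.eq_nil]
      rfl
  | cons a w' ih =>
      intro q hw hq
      cases q with
      | nil => exact absurd hq.symm.eq_nil (by simp)
      | cons b q' =>
          have hmem : b ∈ a :: w' := hq.subset (List.mem_cons_self ..)
          have hab : a ≤ b := by
            rcases List.mem_cons.mp hmem with h | h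
            · exact le_of_eq h.symm
            · exact (List.pairwise_cons.mp hw).1 b h
          rcases lt_or_eq_of_le hab with h1 | h1
          · simp only [pvLexLt]
            rw [if_neg (not_lt.mpr (le_of_lt h1)), if_pos h1]
          · subst h1
            rw [pvLex_cons_self]
            exact ih q' (List.pairwise_cons.mp hw).2 hq.cons_inv

-- ---- the classical next-permutation minimality theorem (char-list level) ----
lemma pvCore (d e : Char) (w m : List Char)
    (hw : w.Pairwise (fun a b => b ≤ a))
    (hde : d < e)
    (hmin : ∀ x ∈ w, d < x → e ≤ x)
    (hmP : m.Pairwise (fun a b => a ≤ b))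
    (hmp : m.Perm (d :: w.erase e)) :
    ∀ (u q : List Char), q.Perm (u ++ d :: w) → pvLexLt (u ++ d :: w) q = true →
      (u ++ e :: m) = q ∨ pvLexLt (u ++ e :: m) q = true := by
  intro u
  induction u with
  | nil =>
      intro q hq hlt
      cases q with
      | nil => exact absurd hq.symm.eq_nil (by simp)
      | cons b q' =>
          simp only [List.nil_append] at hq hlt ⊢
          rcases lt_trichotomy d b with h1 | h1 | h1
          · have hbw : b ∈ w := by
              rcases List.mem_cons.mp (hq.subset (List.mem_cons_self ..)) with h | h
              · exact absurd h.symm (ne_of_lt h1)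
              · exact h
            rcases lt_or_eq_of_le (hmin b hbw h1) with h2 | h2
            · exact Or.inr (pvLex_cons_lt h2 m q')
            · subst h2
              have hq' : q'.Perm m := by
                have h3 : ((e :: q').erase e).Perm ((d :: w).erase e) := hq.erase e
                rw [List.erase_cons_head] at h3
                rw [List.erase_cons_tail (by simp [ne_of_lt hde])] at h3
                exact h3.trans hmp.symm
              rcases pvLex_trichotomy m q' with h3 | h3 | h3
              · exact Or.inr (by rwa [pvLex_cons_self])
              · exact Or.inl (by rw [h3])
              · exact absurd h3 (by simp [pvLex_min m q' hmP hq'])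
          · subst h1
            rw [pvLex_cons_self] at hlt
            exact absurd hlt (by simp [pvLex_max w q' hw hq.cons_inv])
          · simp only [pvLexLt] at hlt
            rw [if_neg (not_lt.mpr (le_of_lt h1)), if_pos h1] at hlt
            exact absurd hlt (by simp)
  | cons x u' ih =>
      intro q hq hlt
      cases q with
      | nil => exact absurd hq.symm.eq_nil (by simp)
      | cons b q' =>
          simp only [List.cons_append] at hq hlt ⊢
          rcases lt_trichotomy x b with h1 | h1 | h1
          · exact Or.inr (pvLex_cons_lt h1 _ _)
          · subst h1
            rw [pvLex_cons_self] at hlt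
            rcases ih q' hq.cons_inv hlt with h2 | h2
            · exact Or.inl (by rw [h2])
            · exact Or.inr (by rwa [pvLex_cons_self])
          · simp only [pvLexLt] at hlt
            rw [if_neg (not_lt.mpr (le_of_lt h1)), if_pos h1] at hlt
            exact absurd hlt (by simp)

-- ---- characterization of B's recursive search ----
lemma pvLexLe_trans {a b c : List Char} (h1 : a = b ∨ pvLexLt a b = true)
    (h2 : b = c ∨ pvLexLt b c = true) : a = c ∨ pvLexLt a c = true := by
  rcases h1 with rfl | h1
  · exact h2
  · rcases h2 with rfl | h2
    · exact Or.inr h1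
    · exact Or.inr (pvLex_trans a b c h1 h2)

lemma pvSearchLeaf (s acc : List Char) (best : Option (List Char)) :
    (pvSearch [] acc s best = best ∨
      ∃ p, p.Perm ([] : List Char) ∧ pvSearch [] acc s best = some (acc ++ p) ∧
        pvLexLt s (acc ++ p) = true) ∧
    (∀ b, best = some b → ∃ r, pvSearch [] acc s best = some r ∧
      (r = b ∨ pvLexLt r b = true)) ∧
    (∀ p, p.Perm ([] : List Char) → pvLexLt s (acc ++ p) = true →
      ∃ r, pvSearch [] acc s best = some r ∧
        (r = acc ++ p ∨ pvLexLt r (acc ++ p) = true)) := by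
  cases best with
  | none =>
      by_cases hlt : pvLexLt s acc = true
      · have hres : pvSearch [] acc s none = some acc := by
          simp [pvSearch.eq_def, hlt]
        refine ⟨Or.inr ⟨[], List.Perm.refl _, by simpa using hres, by simpa using hlt⟩, ?_, ?_⟩
        · intro b hb; cases hb
        · intro p hp _
          rw [hp.eq_nil, List.append_nil]
          exact ⟨acc, hres, Or.inl rfl⟩
      · have hres : pvSearch [] acc s none = none := by
          simp [pvSearch.eq_def, hlt]
        refine ⟨Or.inl hres, ?_, ?_⟩
        · intro b hb; cases hb
        · intro p hp hlt'
          rw [hp.eq_nil, List.append_nil] at hlt'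
          exact absurd hlt' hlt
  | some b =>
      by_cases hcond : pvLexLt s acc = true ∧ pvLexLt acc b = true
      · have hres : pvSearch [] acc s (some b) = some acc := by
          simp [pvSearch.eq_def, hcond.1, hcond.2]
        refine ⟨Or.inr ⟨[], List.Perm.refl _, by simpa using hres, by simpa using hcond.1⟩, ?_, ?_⟩
        · intro b' hb'
          cases hb'
          exact ⟨acc, hres, Or.inr hcond.2⟩
        · intro p hp _
          rw [hp.eq_nil, List.append_nil]
          exact ⟨acc, hres, Or.inl rfl⟩
      · have hres : pvSearch [] acc s (some b) = some b := by
          simp only [pvSearch.eq_def]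
          rw [if_neg hcond]
        refine ⟨Or.inl hres, ?_, ?_⟩
        · intro b' hb'
          cases hb'
          exact ⟨b, hres, Or.inl rfl⟩
        · intro p hp hlt'
          rw [hp.eq_nil, List.append_nil] at hlt' ⊢
          have hnab : ¬ pvLexLt acc b = true := fun h => hcond ⟨hlt', h⟩
          rcases pvLex_trichotomy acc b with h | h | h
          · exact absurd h hnab
          · exact ⟨b, hres, Or.inl h.symm⟩
          · exact ⟨b, hres, Or.inr h⟩

lemma pvSearchChooseSpec (s : List Char) : ∀ (N : Nat),
    (∀ (rem acc : List Char) (best : Option (List Char)), rem.length ≤ N →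
      (pvSearch rem acc s best = best ∨
        ∃ p, p.Perm rem ∧ pvSearch rem acc s best = some (acc ++ p) ∧
          pvLexLt s (acc ++ p) = true) ∧
      (∀ b, best = some b → ∃ r, pvSearch rem acc s best = some r ∧
        (r = b ∨ pvLexLt r b = true)) ∧
      (∀ p, p.Perm rem → pvLexLt s (acc ++ p) = true →
        ∃ r, pvSearch rem acc s best = some r ∧
          (r = acc ++ p ∨ pvLexLt r (acc ++ p) = true))) := by
  intro N
  induction N with
  | zero =>
      intro rem acc best hlen
      have hnil : rem = [] := List.length_eq_zero_iff.mp (by omega)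
      subst hnil
      exact pvSearchLeaf s acc best
  | succ N ih =>
      have hchoose : ∀ (right left acc : List Char) (best : Option (List Char)),
          left.length + right.length ≤ N + 1 →
          (pvChoose left right acc s best = best ∨
            ∃ p, p.Perm (left ++ right) ∧ pvChoose left right acc s best = some (acc ++ p) ∧
              pvLexLt s (acc ++ p) = true) ∧
          (∀ b, best = some b → ∃ r, pvChoose left right acc s best = some r ∧
            (r = b ∨ pvLexLt r b = true)) ∧
          (∀ (i : Nat) (hi : i < right.length) (p : List Char),
            p.Perm (left ++ right.eraseIdx i) →
            pvLexLt s (acc ++ right[i] :: p) = true →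
            ∃ r, pvChoose left right acc s best = some r ∧
              (r = acc ++ right[i] :: p ∨ pvLexLt r (acc ++ right[i] :: p) = true)) := by
        intro right
        induction right with
        | nil =>
            intro left acc best _
            have hres : pvChoose left [] acc s best = best := by
              simp [pvChoose.eq_def]
            refine ⟨Or.inl hres, ?_, ?_⟩
            · intro b hb
              exact ⟨b, by rw [hres, hb], Or.inl rfl⟩
            · intro i hi
              exact absurd hi (by simp)
        | cons c rest ihr =>
            intro left acc best hlen
            obtain ⟨S1, S2, S3⟩ := ih (left ++ rest) (acc ++ [c]) best
              (by simp at hlen ⊢; omega)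
            obtain ⟨C1, C2, C3⟩ := ihr (left ++ [c]) acc
              (pvSearch (left ++ rest) (acc ++ [c]) s best) (by simp at hlen ⊢; omega)
            have hres : pvChoose left (c :: rest) acc s best =
                pvChoose (left ++ [c]) rest acc s
                  (pvSearch (left ++ rest) (acc ++ [c]) s best) := by
              conv_lhs => rw [pvChoose.eq_def]
            rw [hres]
            refine ⟨?_, ?_, ?_⟩
            · -- I1
              rcases C1 with hC | ⟨p, hp, hr, hlt⟩
              · rw [hC]
                rcases S1 with hS | ⟨p, hp, hr, hlt⟩
                · exact Or.inl hS
                · refine Or.inr ⟨c :: p, ?_, by simpa using hr, by simpa using hlt⟩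
                  exact (hp.cons c).trans List.perm_middle.symm
              · refine Or.inr ⟨p, ?_, hr, hlt⟩
                simpa [List.append_assoc] using hp
            · -- I2
              intro b hb
              obtain ⟨r1, hr1, h1⟩ := S2 b hb
              obtain ⟨r, hr, h2⟩ := C2 r1 hr1
              exact ⟨r, hr, pvLexLe_trans h2 h1⟩
            · -- I3
              intro i hi p hp hlt
              cases i with
              | zero =>
                  simp only [List.getElem_cons_zero] at hlt ⊢
                  simp only [List.eraseIdx_cons_zero] at hp
                  obtain ⟨r1, hr1, h1⟩ := S3 p hp (by simpa [List.append_assoc] using hlt)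
                  obtain ⟨r, hr, h2⟩ := C2 r1 hr1
                  refine ⟨r, hr, pvLexLe_trans h2 ?_⟩
                  simpa [List.append_assoc] using h1
              | succ j =>
                  simp only [List.getElem_cons_succ] at hlt ⊢
                  simp only [List.eraseIdx_cons_succ] at hp
                  have hp' : p.Perm ((left ++ [c]) ++ rest.eraseIdx j) := by
                    simpa [List.append_assoc] using hp
                  exact C3 j (by simpa using hi) p hp' hlt
      intro rem acc best hlen
      cases rem with
      | nil => exact pvSearchLeaf s acc best
      | cons c rest =>
          have hres : pvSearch (c :: rest) acc s best = pvChoose [] (c :: rest) acc s best := by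
            conv_lhs => rw [pvSearch.eq_def]
          obtain ⟨C1, C2, C3⟩ := hchoose (c :: rest) [] acc best (by simpa using hlen)
          rw [hres]
          refine ⟨?_, C2, ?_⟩
          · rcases C1 with h | ⟨p, hp, hr, hlt⟩
            · exact Or.inl h
            · exact Or.inr ⟨p, by simpa using hp, hr, hlt⟩
          · intro p hp hlt
            cases p with
            | nil => exact absurd (hp.symm.eq_nil) (by simp)
            | cons y p' =>
                have hy : y ∈ c :: rest := hp.subset (List.mem_cons_self ..)
                obtain ⟨i, hi, hyi⟩ := List.getElem_of_mem hy
                have herase : ((c :: rest).erase y).Perm ((c :: rest).eraseIdx i) := by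
                  rw [← hyi]
                  exact List.erase_getElem hi
                have hp' : p'.Perm ([] ++ (c :: rest).eraseIdx i) := by
                  have h1 : ((y :: p').erase y).Perm ((c :: rest).erase y) := hp.erase y
                  rw [List.erase_cons_head] at h1
                  simpa using h1.trans herase
                subst hyi
                exact C3 i hi p' hp' (by simpa using hlt)

-- ---- A-side helpers: the pivot scan as a while-loop ----
def pvPivAux (s : List Char) (p : Int) : Int :=
  if h : 0 ≤ p then
    if PySem.List.pyGetD s (p + 1) ' ' ≤ PySem.List.pyGetD s p ' ' then pvPivAux s (p - 1)
    else p
  else -1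
termination_by (p + 1).toNat
decreasing_by omega

lemma pvPivot_eq (s : List Char) : ∀ (k : Nat),
    pvALoop1 s (PySem.List.pyRange (k : Int) 0 (-1)) = pvPivAux s ((k : Int) - 1) := by
  intro k
  induction k with
  | zero =>
      rw [PySem.List.pyRange_neg_one_eq_nil (by omega)]
      rw [pvALoop1, pvPivAux]
      norm_num
  | succ k ih =>
      rw [show ((k + 1 : Nat) : Int) = (k : Int) + 1 by push_cast; ring]
      rw [PySem.List.pyRange_neg_one_cons (by omega)]
      rw [pvALoop1]
      rw [show (k : Int) + 1 - 1 = (k : Int) by ring]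
      rw [pvPivAux]
      rw [dif_pos (by omega : (0 : Int) ≤ (k : Int))]
      by_cases h : PySem.List.pyGetD s (k : Int) ' ' < PySem.List.pyGetD s ((k : Int) + 1) ' '
      · rw [if_pos h, if_neg (not_le.mpr h)]
      · rw [if_neg h, if_pos (not_lt.mp h)]
        exact ih

-- pvPivAux returns -1 (and then no ascent at any scanned pair) or the rightmost ascent position.
lemma pvPiv_facts (s : List Char) (q : Int) :
    (pvPivAux s q = -1 ∧ ∀ i : Int, 0 ≤ i → i ≤ q →
        ¬ PySem.List.pyGetD s i ' ' < PySem.List.pyGetD s (i + 1) ' ') ∨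
    (0 ≤ pvPivAux s q ∧ pvPivAux s q ≤ q ∧
      PySem.List.pyGetD s (pvPivAux s q) ' ' < PySem.List.pyGetD s (pvPivAux s q + 1) ' ' ∧
      ∀ i : Int, pvPivAux s q < i → i ≤ q →
        ¬ PySem.List.pyGetD s i ' ' < PySem.List.pyGetD s (i + 1) ' ') := by
  induction q using pvPivAux.induct s with
  | case1 p h h2 ih =>
      rw [pvPivAux, dif_pos h, if_pos h2]
      rcases ih with ⟨h3, h4⟩ | ⟨h3, h4, h5, h6⟩
      · refine Or.inl ⟨h3, ?_⟩
        intro i hi0 hip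
        rcases lt_or_eq_of_le hip with hlt | rfl
        · exact h4 i hi0 (by omega)
        · exact not_lt.mpr h2
      · refine Or.inr ⟨h3, by omega, h5, ?_⟩
        intro i hgt hle
        rcases lt_or_eq_of_le hle with hlt | rfl
        · exact h6 i hgt (by omega)
        · exact not_lt.mpr h2
  | case2 p h h2 =>
      rw [pvPivAux, dif_pos h, if_neg h2]
      exact Or.inr ⟨h, le_refl _, not_le.mp h2, by omega⟩
  | case3 p h =>
      rw [pvPivAux, dif_neg h]
      exact Or.inl ⟨rfl, by omega⟩

-- invariant of A's second loop (final (larger, index2) = minimal suffix element above temp)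
lemma pvLoop2_spec (s : List Char) (temp : Char) (lo : Int) :
    ∀ (m : Nat) (j : Int) (larger : Char) (idx2 : Int),
      ((s.length : Int) - j).toNat = m →
      lo ≤ j → 0 ≤ j → lo ≤ idx2 → 0 ≤ idx2 → idx2 < (s.length : Int) →
      PySem.List.pyGetD s idx2 ' ' = larger → temp < larger →
      lo ≤ (pvALoop2 s temp (PySem.List.pyRange j (s.length : Int) 1) (larger, idx2)).2 ∧
      0 ≤ (pvALoop2 s temp (PySem.List.pyRange j (s.length : Int) 1) (larger, idx2)).2 ∧
      (pvALoop2 s temp (PySem.List.pyRange j (s.length : Int) 1) (larger, idx2)).2 < (s.length : Int) ∧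
      PySem.List.pyGetD s (pvALoop2 s temp (PySem.List.pyRange j (s.length : Int) 1) (larger, idx2)).2 ' '
        = (pvALoop2 s temp (PySem.List.pyRange j (s.length : Int) 1) (larger, idx2)).1 ∧
      temp < (pvALoop2 s temp (PySem.List.pyRange j (s.length : Int) 1) (larger, idx2)).1 ∧
      (pvALoop2 s temp (PySem.List.pyRange j (s.length : Int) 1) (larger, idx2)).1 ≤ larger ∧
      (∀ i : Int, j ≤ i → i < (s.length : Int) → temp < PySem.List.pyGetD s i ' ' →
        (pvALoop2 s temp (PySem.List.pyRange j (s.length : Int) 1) (larger, idx2)).1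
          ≤ PySem.List.pyGetD s i ' ') := by
  intro m
  induction m with
  | zero =>
      intro j larger idx2 hm hlj h0j hli h0i hilen hg htl
      rw [PySem.List.pyRange_one_eq_nil (by omega)]
      rw [pvALoop2]
      refine ⟨hli, h0i, hilen, hg, htl, le_refl _, ?_⟩
      intro i hji hilen' _
      omega
  | succ m ih =>
      intro j larger idx2 hm hlj h0j hli h0i hilen hg htl
      have hjlen : j < (s.length : Int) := by omega
      rw [PySem.List.pyRange_one_cons hjlen]
      rw [pvALoop2]
      by_cases hc : temp < PySem.List.pyGetD s j ' ' ∧ PySem.List.pyGetD s j ' ' < larger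
      · rw [if_pos hc]
        have := ih (j + 1) (PySem.List.pyGetD s j ' ') j (by omega) (by omega) (by omega)
          hlj h0j hjlen rfl hc.1
        obtain ⟨a1, a2, a3, a4, a5, a6, a7⟩ := this
        refine ⟨a1, a2, a3, a4, a5, le_of_lt (lt_of_le_of_lt a6 hc.2), ?_⟩
        intro i hji hilen' hti
        by_cases hij : j + 1 ≤ i
        · exact a7 i hij hilen' hti
        · have hij' : i = j := by omega
          rw [hij'] at hti ⊢
          exact a6
      · rw [if_neg hc]
        have := ih (j + 1) larger idx2 (by omega) (by omega) (by omega) hli h0i hilen hg htl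
        obtain ⟨a1, a2, a3, a4, a5, a6, a7⟩ := this
        refine ⟨a1, a2, a3, a4, a5, a6, ?_⟩
        intro i hji hilen' hti
        by_cases hij : j + 1 ≤ i
        · exact a7 i hij hilen' hti
        · have hij' : i = j := by omega
          rw [hij'] at hti ⊢
          have hnl : ¬ PySem.List.pyGetD s j ' ' < larger := fun hlt => hc ⟨hti, hlt⟩
          exact le_trans a6 (not_lt.mp hnl)

-- replacing position j by a value perm-equals consing that value onto the list minus l[j]
lemma pvSet_perm (l : List Char) (j : Nat) (hj : j < l.length) (c : Char) :
    (l.set j c).Perm (c :: l.erase l[j]) := by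
  have e1 : l.set j c = l.take j ++ c :: l.drop (j + 1) := List.set_eq_take_cons_drop c hj
  have p1 : (l.set j c).Perm (c :: l.eraseIdx j) := by
    rw [e1, List.eraseIdx_eq_take_drop_succ]
    exact List.perm_middle
  have q1 : (l.eraseIdx j).Perm (l.erase l[j]) := (List.erase_getElem hj).symm
  exact p1.trans (q1.cons c)

-- adjacent non-ascent gives a non-increasing list
lemma pvHeadBound : ∀ (l : List Char), (∀ i (h : i + 1 < l.length), l[i + 1] ≤ l[i]) →
    ∀ j (hj : j < l.length) (h0 : 0 < l.length), l[j] ≤ l[0] := by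
  intro l hadj j
  induction j with
  | zero => intro hj h0; exact le_refl _
  | succ j ihj => intro hj h0; exact le_trans (hadj j hj) (ihj (by omega) h0)

lemma pvPairwise_of_adj : ∀ (l : List Char),
    (∀ i (h : i + 1 < l.length), l[i + 1] ≤ l[i]) →
    l.Pairwise (fun a b => b ≤ a) := by
  intro l
  induction l with
  | nil => intro _; exact List.Pairwise.nil
  | cons a t ih =>
      intro hadj
      refine List.pairwise_cons.mpr ⟨?_, ih ?_⟩
      · intro x hx
        obtain ⟨j, hj, hxj⟩ := List.getElem_of_mem hx
        have h := pvHeadBound (a :: t) hadj (j + 1) (by simpa using hj) (by simp)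
        simpa [hxj] using h
      · intro i hi
        have h := hadj (i + 1) (by simpa using hi)
        simpa using h

lemma pvToChars_neg (n : Int) (h : n < 0) :
    PySem.Int.toChars n = '-' :: PySem.Int.toChars (-n) := by
  have h2 : ¬ -n < 0 := by omega
  simp only [PySem.Int.toChars, if_pos h, if_neg h2]
  have h3 : n.natAbs = (-n).toNat := by omega
  rw [h3]

-- A's pivot body: the rebuilt character list is  prefix ++ successor :: sorted-remainder
lemma pvAStep (f : List Char) (p : Int) (hp0 : 0 ≤ p) (hple : p ≤ (f.length : Int) - 2)
    (hasc : PySem.List.pyGetD f p ' ' < PySem.List.pyGetD f (p + 1) ' ') :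
    ∃ (e : Char) (m : List Char),
      (f[p.toNat]'(by omega) < e) ∧
      (∀ x ∈ f.drop (p.toNat + 1), f[p.toNat]'(by omega) < x → e ≤ x) ∧
      m.Pairwise (fun a b => a ≤ b) ∧
      m.Perm (f[p.toNat]'(by omega) :: (f.drop (p.toNat + 1)).erase e) ∧
      e ∈ f.drop (p.toNat + 1) ∧
      (let temp := PySem.List.pyGetD f p ' ';
       let r := pvALoop2 f temp (PySem.List.pyRange (p + 1) ((f.length : Int)) 1)
                  (PySem.List.pyGetD f (p + 1) ' ', p + 1);
       let s1 := PySem.List.pySetD (PySem.List.pySetD f p (PySem.List.pyGetD f r.2 ' ')) r.2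
                  (PySem.List.pyGetD f p ' ');
       PySem.List.slice s1 none (some (p + 1)) ++
         PySem.List.sorted (PySem.List.slice s1 (some (p + 1)) none) (fun c => c) false
         = f.take p.toNat ++ e :: m) := by
  have hplen : p + 1 < (f.length : Int) := by omega
  set temp := PySem.List.pyGetD f p ' ' with htemp
  set larger0 := PySem.List.pyGetD f (p + 1) ' ' with hlarger0
  set r := pvALoop2 f temp (PySem.List.pyRange (p + 1) ((f.length : Int)) 1)
             (larger0, p + 1) with hrdef
  obtain ⟨a1, a2, a3, a4, a5, a6, a7⟩ :=
    pvLoop2_spec f temp (p + 1) (((f.length : Int) - (p + 1)).toNat) (p + 1) larger0 (p + 1)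
      rfl (le_refl _) (by omega) (le_refl _) (by omega) hplen rfl hasc
  rw [← hrdef] at a1 a2 a3 a4 a5 a6 a7
  set P := p.toNat with hP
  have hpP : p = (P : Int) := by omega
  have hP2 : P + 1 < f.length := by omega
  set R := r.2.toNat with hR
  have hRge : P + 1 ≤ R := by omega
  have hRlt : R < f.length := by omega
  set w := f.drop (P + 1) with hw
  have hwlen : w.length = f.length - (P + 1) := by rw [hw]; exact List.length_drop
  have hjR : R - (P + 1) < w.length := by omega
  have hwR : w[R - (P + 1)]'hjR = f[R]'hRlt := by
    simp only [hw, List.getElem_drop]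
    congr 1
    omega
  have htempd : temp = f[P]'(by omega) := by
    rw [htemp, PySem.List.pyGetD_eq_getElem f ' ' hp0 (by omega)]
  have heR : f[R]'hRlt = r.1 := by
    rw [← a4, PySem.List.pyGetD_eq_getElem f ' ' a2 a3]
  refine ⟨r.1, PySem.List.sorted (w.set (R - (P + 1)) temp) (fun c => c) false,
    ?_, ?_, ?_, ?_, ?_, ?_⟩
  · rw [← htempd]; exact a5
  · -- minimality among the suffix
    intro x hx hdx
    obtain ⟨j, hj, hxj⟩ := List.getElem_of_mem hx
    have hfj : PySem.List.pyGetD f ((P : Int) + 1 + (j : Int)) ' ' = x := by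
      rw [PySem.List.pyGetD_eq_getElem f ' ' (by omega) (by omega)]
      rw [← hxj]
      simp only [hw, List.getElem_drop]
      congr 1
    have := a7 ((P : Int) + 1 + (j : Int)) (by omega) (by omega)
      (by rw [hfj, htempd]; exact hdx)
    rwa [hfj] at this
  · exact PySem.List.sorted_pairwise _ (fun c => c)
  · -- permutation fact
    have h1 : (PySem.List.sorted (w.set (R - (P + 1)) temp) (fun c => c) false).Perm
        (w.set (R - (P + 1)) temp) := PySem.List.sorted_perm _ _ _
    refine h1.trans ?_
    have h2 := pvSet_perm w (R - (P + 1)) hjR temp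
    rw [hwR, heR] at h2
    have htempd' : temp = f[p.toNat]'(by omega) := htempd
    rw [← htempd']
    exact h2
  · rw [← heR, ← hwR]
    exact List.getElem_mem hjR
  · -- the list computation
    dsimp only
    rw [a4]
    rw [PySem.List.pySetD_of_nonneg f _ hp0, PySem.List.pySetD_of_nonneg _ _ a2]
    rw [← hP, ← hR]
    have hlenset : (((f.set P r.1).set R temp).length : Int) = (f.length : Int) := by simp
    rw [PySem.List.slice_to _ (by omega : (0 : Int) ≤ p + 1)]
    rw [PySem.List.slice_from _ (by omega : (0 : Int) ≤ p + 1)]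
    rw [show (p + 1).toNat = P + 1 by omega]
    have etake : (((f.set P r.1).set R temp).take (P + 1)) = f.take P ++ [r.1] := by
      rw [List.take_set, List.set_eq_of_length_le (by rw [List.length_take]; omega)]
      rw [List.take_set, List.take_add_one]
      rw [List.getElem?_eq_getElem (by omega : P < f.length)]
      rw [List.set_append, if_neg (by rw [List.length_take]; omega)]
      congr 1
      · rw [List.length_take]
        rw [show P - min P f.length = 0 by omega]
        rfl
    have edrop : (((f.set P r.1).set R temp).drop (P + 1)) = w.set (R - (P + 1)) temp := by
      rw [List.drop_set, if_neg (by omega)]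
      congr 1
      rw [hw, List.drop_set, if_pos (by omega)]
    rw [etake, edrop]
    simp

-- uniqueness: the search returns exactly the minimal greater rearrangement
lemma pvUnique (s t : List Char) (ht : t.Perm s) (hgt : pvLexLt s t = true)
    (hminT : ∀ q, q.Perm s → pvLexLt s q = true → t = q ∨ pvLexLt t q = true) :
    pvSearch s [] s none = some t := by
  obtain ⟨I1, _, I3⟩ := pvSearchChooseSpec s s.length s [] none (le_refl _)
  obtain ⟨r, hr, hle⟩ := I3 t ht (by simpa using hgt)
  simp only [List.nil_append] at hr hle
  rcases I1 with h | ⟨q, hq, hres, hlt⟩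
  · rw [h] at hr; cases hr
  · simp only [List.nil_append] at hres hlt
    rw [hres] at hr
    injection hr with hr'
    subst hr'
    rcases hminT q hq hlt with h2 | h2
    · rw [hres, h2]
    · rcases hle with h3 | h3
      · rw [hres, h3]
      · exact absurd h3 (by simp [pvLex_asymm _ _ h2])

lemma pvGetCongr (l : List Char) (i j : Nat) (hij : i = j) (hi : i < l.length) :
    l[i]'hi = l[j]'(hij ▸ hi) := by
  subst hij
  rfl

-- the heart: both ports compute the same value on every admitted input.
lemma pvMain (n : Int) (hpre : Pre_nextGreaterElement_1 n) :
    nextGreaterElement_1 n = nextGreaterElement_1_alt n := by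
  simp only [nextGreaterElement_1, nextGreaterElement_1_alt]
  by_cases hsign : 0 ≤ n
  · -- n ≥ 0 : the search runs on the full digit list f = toChars n
    rw [if_pos hsign, if_neg (by omega : ¬ n < 0)]
    set f : List Char := PySem.Int.toChars n with hf
    by_cases hlen : f.length = 0
    · have hfe : f = [] := List.length_eq_zero_iff.mp hlen
      rw [hfe]
      rw [show ((([] : List Char).length : Int) - 1) = -1 by simp]
      rw [PySem.List.pyRange_neg_one_eq_nil (by omega)]
      rw [show pvALoop1 [] [] = -1 from rfl]
      simp [pvSearch.eq_def, pvLexLt]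
    · have hlen1 : 1 ≤ f.length := by omega
      have hA1 : pvALoop1 f (PySem.List.pyRange ((f.length : Int) - 1) 0 (-1))
          = pvPivAux f ((f.length : Int) - 2) := by
        have h := pvPivot_eq f (f.length - 1)
        rw [show (((f.length - 1 : Nat)) : Int) = (f.length : Int) - 1 by omega] at h
        rw [h]
        congr 1
        omega
      rw [hA1]
      rcases pvPiv_facts f ((f.length : Int) - 2) with ⟨hm1, hnoasc⟩ | ⟨hp0, hple, hasc, hmax⟩
      · -- no pivot: f is non-increasing, so no rearrangement is greater; both sides give -1
        rw [hm1, if_pos rfl]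
        have hadj : ∀ i (h : i + 1 < f.length), f[i + 1] ≤ f[i] := by
          intro i hi
          have h := hnoasc (i : Int) (by omega) (by omega)
          rw [PySem.List.pyGetD_eq_getElem f ' ' (by omega) (by omega),
            PySem.List.pyGetD_eq_getElem f ' ' (by omega) (by omega)] at h
          simp only [Int.toNat_natCast] at h
          rw [not_lt] at h
          rw [pvGetCongr f ((i : Int) + 1).toNat (i + 1) (by omega)] at h
          exact h
        have hPW := pvPairwise_of_adj f hadj
        obtain ⟨I1, _, _⟩ := pvSearchChooseSpec f f.length f [] none (le_refl _)
        rcases I1 with h | ⟨q, hq, hres, hlt⟩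
        · rw [h]
        · rw [List.nil_append] at hlt
          rw [pvLex_max f q hPW hq] at hlt
          cases hlt
      · -- pivot exists
        set p := pvPivAux f ((f.length : Int) - 2) with hpdef
        rw [if_neg (by omega : ¬ p = -1)]
        obtain ⟨e, m, hd, hmin, hmP, hmperm, hmem, hlist⟩ := pvAStep f p hp0 hple hasc
        dsimp only at hlist
        rw [hlist]
        -- decomposition of f at the pivot
        set P := p.toNat with hP
        have hdec : f = f.take P ++ f[P]'(by omega) :: f.drop (P + 1) := by
          conv_lhs => rw [← List.take_append_drop P f]
          congr 1
          rw [List.drop_eq_getElem_cons (by omega : P < f.length)]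
        have hw : (f.drop (P + 1)).Pairwise (fun a b => b ≤ a) := by
          apply pvPairwise_of_adj
          intro i hi
          have hlend : (f.drop (P + 1)).length = f.length - (P + 1) := List.length_drop
          have h := hmax ((P : Int) + 1 + (i : Int)) (by omega) (by omega)
          rw [PySem.List.pyGetD_eq_getElem f ' ' (by omega) (by omega),
            PySem.List.pyGetD_eq_getElem f ' ' (by omega) (by omega)] at h
          rw [not_lt] at h
          have e1 : (f.drop (P + 1))[i + 1]'(by omega) =
              f[((P : Int) + 1 + (i : Int) + 1).toNat]'(by omega) := by
            simp only [List.getElem_drop]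
            congr 1
          have e2 : (f.drop (P + 1))[i]'(by omega) =
              f[((P : Int) + 1 + (i : Int)).toNat]'(by omega) := by
            simp only [List.getElem_drop]
            congr 1
          rw [e1, e2]
          exact h
        set t := f.take P ++ e :: m with ht
        have htperm : t.Perm f := by
          conv_rhs => rw [hdec]
          refine List.Perm.append_left _ ?_
          have h1 : (e :: m).Perm (e :: f[P]'(by omega) :: (f.drop (P + 1)).erase e) :=
            hmperm.cons e
          refine h1.trans ?_
          refine (List.Perm.swap _ _ _).trans ?_
          exact (List.perm_cons_erase hmem).symm.cons _
        have htgt : pvLexLt f t = true := by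
          conv_lhs => rw [hdec]
          rw [ht, pvLex_append_left]
          exact pvLex_cons_lt hd _ m
        have hminT : ∀ q, q.Perm f → pvLexLt f q = true → t = q ∨ pvLexLt t q = true := by
          intro q hq hlt
          have := pvCore (f[P]'(by omega)) e (f.drop (P + 1)) m hw hd hmin hmP hmperm
            (f.take P) q (by rw [← hdec] at *; exact hq) (by rw [← hdec]; exact hlt)
          rwa [← ht] at this
        rw [pvUnique f t htperm htgt hminT]
        simp
  · -- n < 0 : f = '-' :: s and the search runs on the magnitude digits s
    have hneg : n < 0 := by omega
    have hs := pvToChars_neg n hneg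
    set s : List Char := PySem.Int.toChars (-n) with hsdef
    rw [if_neg hsign, if_pos hneg]
    have hch : ¬ List.IsChain (fun a b => b ≤ a) s := by
      rcases hpre with h | h
      · omega
      · rw [hs] at h
        simpa using h
    rw [hs]
    set f : List Char := '-' :: s with hf
    have hflen : f.length = s.length + 1 := by simp [hf]
    have hgets : ∀ i (hi : i < s.length), f[i + 1]'(by omega) = s[i] := by
      intro i hi
      simp only [hf, List.getElem_cons_succ]
    have hA1 : pvALoop1 f (PySem.List.pyRange ((f.length : Int) - 1) 0 (-1))
        = pvPivAux f ((f.length : Int) - 2) := by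
      have h := pvPivot_eq f (f.length - 1)
      rw [show (((f.length - 1 : Nat)) : Int) = (f.length : Int) - 1 by omega] at h
      rw [h]
      congr 1
      omega
    rw [hA1]
    have hchain : ∀ (lo : Int), 1 ≤ lo →
        (∀ i : Int, lo ≤ i → i ≤ (f.length : Int) - 2 →
          ¬ PySem.List.pyGetD f i ' ' < PySem.List.pyGetD f (i + 1) ' ') →
        (∀ j (hj : j + 1 < s.length), (lo.toNat - 1) ≤ j → s[j + 1] ≤ s[j]) := by
      intro lo hlo hno j hj hjlo
      have h := hno ((j : Int) + 1) (by omega) (by omega)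
      rw [PySem.List.pyGetD_eq_getElem f ' ' (by omega) (by omega),
        PySem.List.pyGetD_eq_getElem f ' ' (by omega) (by omega)] at h
      rw [not_lt] at h
      have e1 : f[((j : Int) + 1).toNat]'(by omega) = s[j]'(by omega) := by
        rw [pvGetCongr f ((j : Int) + 1).toNat (j + 1) (by omega)]
        exact hgets j (by omega)
      have e2 : f[((j : Int) + 1 + 1).toNat]'(by omega) = s[j + 1]'hj := by
        rw [pvGetCongr f ((j : Int) + 1 + 1).toNat ((j + 1) + 1) (by omega)]
        exact hgets (j + 1) hj
      rw [e1, e2] at h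
      exact h
    rcases pvPiv_facts f ((f.length : Int) - 2) with ⟨hm1, hnoasc⟩ | ⟨hp0, hple, hasc, hmax⟩
    · exfalso
      apply hch
      rw [List.isChain_iff_getElem]
      intro i hi
      exact hchain 1 (le_refl _) (fun i h1 h2 => hnoasc i (by omega) h2) i (by omega) (by omega)
    · set p := pvPivAux f ((f.length : Int) - 2) with hpdef
      have hp1 : 1 ≤ p := by
        rcases lt_or_ge p 1 with h | h
        · exfalso
          apply hch
          rw [List.isChain_iff_getElem]
          intro i hi
          exact hchain (p + 1) (by omega) (fun i h1 h2 => hmax i (by omega) h2) i (by omega)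
            (by omega)
        · exact h
      rw [if_neg (by omega : ¬ p = -1)]
      obtain ⟨e, m, hd, hmin, hmP, hmperm, hmem, hlist⟩ := pvAStep f p hp0 hple hasc
      dsimp only at hlist
      rw [hlist]
      have htake : f.take p.toNat = '-' :: s.take (p.toNat - 1) := by
        conv_lhs => rw [hf, show p.toNat = (p.toNat - 1) + 1 by omega]
        rw [List.take_succ_cons]
      have hdP : f[p.toNat]'(by omega) = s[p.toNat - 1]'(by omega) := by
        rw [pvGetCongr f p.toNat ((p.toNat - 1) + 1) (by omega)]
        exact hgets (p.toNat - 1) (by omega)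
      have hdrop : f.drop (p.toNat + 1) = s.drop (p.toNat - 1 + 1) := by
        rw [hf, show p.toNat + 1 = (p.toNat - 1) + 1 + 1 by omega, List.drop_succ_cons]
      have hws : (s.drop (p.toNat - 1 + 1)).Pairwise (fun a b => b ≤ a) := by
        rw [← hdrop]
        apply pvPairwise_of_adj
        intro i hi
        have hlend : (f.drop (p.toNat + 1)).length = f.length - (p.toNat + 1) :=
          List.length_drop
        have h := hmax ((p.toNat : Int) + 1 + (i : Int)) (by omega) (by omega)
        rw [PySem.List.pyGetD_eq_getElem f ' ' (by omega) (by omega),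
          PySem.List.pyGetD_eq_getElem f ' ' (by omega) (by omega)] at h
        rw [not_lt] at h
        have e1 : (f.drop (p.toNat + 1))[i + 1]'(by omega) =
            f[((p.toNat : Int) + 1 + (i : Int) + 1).toNat]'(by omega) := by
          simp only [List.getElem_drop]
          congr 1
        have e2 : (f.drop (p.toNat + 1))[i]'(by omega) =
            f[((p.toNat : Int) + 1 + (i : Int)).toNat]'(by omega) := by
          simp only [List.getElem_drop]
          congr 1
        rw [e1, e2]
        exact h
      have hdecs : s = s.take (p.toNat - 1) ++
          s[p.toNat - 1]'(by omega) :: s.drop (p.toNat - 1 + 1) := by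
        conv_lhs => rw [← List.take_append_drop (p.toNat - 1) s]
        congr 1
        rw [List.drop_eq_getElem_cons (by omega : p.toNat - 1 < s.length)]
      have hds : s[p.toNat - 1]'(by omega) < e := by
        rw [← hdP]; exact hd
      have hmins : ∀ x ∈ s.drop (p.toNat - 1 + 1), s[p.toNat - 1]'(by omega) < x → e ≤ x := by
        intro x hx hlt
        refine hmin x ?_ ?_
        · rw [hdrop]; exact hx
        · rw [hdP]; exact hlt
      have hmperms : m.Perm (s[p.toNat - 1]'(by omega) :: (s.drop (p.toNat - 1 + 1)).erase e) := by
        rw [← hdP, ← hdrop]; exact hmperm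
      have hmems : e ∈ s.drop (p.toNat - 1 + 1) := by
        rw [← hdrop]; exact hmem
      set ts := s.take (p.toNat - 1) ++ e :: m with hts
      have htperm : ts.Perm s := by
        conv_rhs => rw [hdecs]
        refine List.Perm.append_left _ ?_
        have h1 : (e :: m).Perm
            (e :: s[p.toNat - 1]'(by omega) :: (s.drop (p.toNat - 1 + 1)).erase e) :=
          hmperms.cons e
        refine h1.trans ?_
        refine (List.Perm.swap _ _ _).trans ?_
        exact (List.perm_cons_erase hmems).symm.cons _
      have htgt : pvLexLt s ts = true := by
        conv_lhs => rw [hdecs]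
        rw [hts, pvLex_append_left]
        exact pvLex_cons_lt hds _ m
      have hminT : ∀ q, q.Perm s → pvLexLt s q = true → ts = q ∨ pvLexLt ts q = true := by
        intro q hq hlt
        have := pvCore (s[p.toNat - 1]'(by omega)) e (s.drop (p.toNat - 1 + 1)) m hws hds
          hmins hmP hmperms (s.take (p.toNat - 1)) q
          (by rw [← hdecs] at *; exact hq) (by rw [← hdecs]; exact hlt)
        rwa [← hts] at this
      rw [pvUnique s ts htperm htgt hminT]
      rw [htake]
      simp [hts]

-- ===== VERDICT (by name: the statement is the Claim_ definition above) =====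
theorem nextGreaterElement_1_spec : Claim_equal_nextGreaterElement_1 := by
  intro n _ hpre
  unfold Spec_nextGreaterElement_1
  exact pvMain n hpre
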